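-- pv_equiv track=rewrite | github.com/augustocaruso/medical-notes-workbench | extension/scripts/mednotes/wiki/note_style/validate.py | _paragraphs
-- ===== SOURCE A (Python) =====
-- def _paragraphs(body: str) -> list[tuple[str, int]]:
--     paragraphs: list[tuple[str, int]] = []
--     current: list[str] = []
--     start_line = 1
--     in_code = False
--     for idx, line in enumerate(body.splitlines(), start=1):
--         stripped = line.strip()
--         if stripped.startswith("```"):
--             in_code = not in_code
--         skip = (
--             in_code
--             or not stripped
--             or stripped.startswith(("#", "-", ">", "|", "1.", "2.", "3.", "4.", "5.", "---"))
--         )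
--         if skip:
--             if current:
--                 paragraphs.append((" ".join(current), start_line))
--                 current = []
--             continue
--         if not current:
--             start_line = idx
--         current.append(stripped)
--     if current:
--         paragraphs.append((" ".join(current), start_line))
--     return paragraphs
-- ===== SOURCE B (Python) =====
-- def _paragraphs(body):
--     # Pass 1: flag table (idx, stripped, skip) with the code-fence toggle resolved.
--     flags = []
--     in_code = False
--     for idx, line in enumerate(body.splitlines(), start=1):
--         stripped = line.strip()
--         if stripped.startswith("```"):
--             in_code = not in_code
--         skip = (in_code or not stripped
--                 or stripped.startswith(("#", "-", ">", "|", "1.", "2.", "3.", "4.", "5.")))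
--         flags.append((idx, stripped, skip))
--     # Pass 2: group maximal runs of non-skip rows.
--     out = []
--     n = len(flags)
--     j = 0
--     while j < n:
--         if flags[j][2]:
--             j += 1
--             continue
--         k = j
--         while k < n and not flags[k][2]:
--             k += 1
--         out.append((" ".join(f[1] for f in flags[j:k]), flags[j][0]))
--         j = k
--     return out
-- ===== Notes on version B (the rewrite author's own statement) =====
-- stated objective: alternative
-- what changed: A's single fold with inline flush-on-skip accumulator state is replaced by two passes: build a flag table (idx, stripped, skip) resolving the code-fence toggle, then group maximal runs of non-skip rows (and the redundant "---" prefix test is dropped).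
import Mathlib
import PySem

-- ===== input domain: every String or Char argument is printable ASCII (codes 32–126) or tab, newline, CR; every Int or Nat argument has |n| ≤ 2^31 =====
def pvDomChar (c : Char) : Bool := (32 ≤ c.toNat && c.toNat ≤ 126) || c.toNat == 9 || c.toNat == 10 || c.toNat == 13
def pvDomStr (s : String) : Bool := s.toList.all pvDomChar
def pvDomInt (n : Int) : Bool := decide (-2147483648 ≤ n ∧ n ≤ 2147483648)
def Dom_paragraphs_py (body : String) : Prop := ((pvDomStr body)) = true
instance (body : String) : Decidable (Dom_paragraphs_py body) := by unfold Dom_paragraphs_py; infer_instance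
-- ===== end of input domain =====

-- B replaces A's inline flush-on-skip accumulation by a two-pass shape (a flag table, then a
-- grouped scan over maximal non-skip runs); objective: alternative decomposition, same cost.

-- ===== PORT A =====
-- A's tuple startswith ("#","-",">","|","1.".."5.","---"), in order
def pvSkipA (s : String) : Bool :=
  PySem.Str.startswith s "#" || PySem.Str.startswith s "-" || PySem.Str.startswith s ">" ||
  PySem.Str.startswith s "|" || PySem.Str.startswith s "1." || PySem.Str.startswith s "2." ||
  PySem.Str.startswith s "3." || PySem.Str.startswith s "4." || PySem.Str.startswith s "5." ||
  PySem.Str.startswith s "---"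

def paragraphs_py (body : String) : List (String × Int) :=
  let fin := (PySem.List.enumerate (PySem.Str.splitlines body) 1).foldl
    (fun (st : List (String × Int) × List String × Int × Bool) p =>
      let stripped := PySem.Str.strip p.2
      let in_code := if PySem.Str.startswith stripped "```" then !st.2.2.2 else st.2.2.2
      let skip := in_code || stripped == "" || pvSkipA stripped
      if skip then
        if !st.2.1.isEmpty then
          (st.1 ++ [(PySem.Str.join " " st.2.1, st.2.2.1)], [], st.2.2.1, in_code)
        else (st.1, st.2.1, st.2.2.1, in_code)
      else
        ((st.1, st.2.1 ++ [stripped], (if st.2.1.isEmpty then p.1 else st.2.2.1), in_code)))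
    ([], [], 1, false)
  if !fin.2.1.isEmpty then fin.1 ++ [(PySem.Str.join " " fin.2.1, fin.2.2.1)] else fin.1

-- ===== PORT B =====
-- B's tuple startswith ("#","-",">","|","1.".."5.") — it drops A's redundant "---" entry
def pvSkipB (s : String) : Bool :=
  PySem.Str.startswith s "#" || PySem.Str.startswith s "-" || PySem.Str.startswith s ">" ||
  PySem.Str.startswith s "|" || PySem.Str.startswith s "1." || PySem.Str.startswith s "2." ||
  PySem.Str.startswith s "3." || PySem.Str.startswith s "4." || PySem.Str.startswith s "5."

-- pass 1: the flag table (idx, stripped, skip)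
def pvFlags (body : String) : List (Int × String × Bool) :=
  ((PySem.List.enumerate (PySem.Str.splitlines body) 1).foldl
    (fun (st : List (Int × String × Bool) × Bool) p =>
      let stripped := PySem.Str.strip p.2
      let in_code := if PySem.Str.startswith stripped "```" then !st.2 else st.2
      (st.1 ++ [(p.1, stripped, in_code || stripped == "" || pvSkipB stripped)], in_code))
    ([], false)).1

-- pass 2: B's while-loop over the table as structural recursion (inner while = takeWhile/dropWhile)
def pvGroup : List (Int × String × Bool) → List (String × Int)
  | [] => []
  | f :: rest =>
    if f.2.2 then pvGroup rest
    else
      (PySem.Str.join " " (f.2.1 :: (rest.takeWhile (fun g => !g.2.2)).map (·.2.1)), f.1)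
        :: pvGroup (rest.dropWhile (fun g => !g.2.2))
  termination_by ts => ts.length
  decreasing_by
    · simp
    · simp
      exact List.length_dropWhile_le _ _

def paragraphs_py_alt (body : String) : List (String × Int) :=
  pvGroup (pvFlags body)

-- ===== PRECONDITION & SPEC =====
def Spec_paragraphs_py (body : String) (out : List (String × Int)) : Prop := out = paragraphs_py_alt body
instance (body : String) (out : List (String × Int)) : Decidable (Spec_paragraphs_py body out) := by unfold Spec_paragraphs_py; infer_instance

-- ===== CLAIM (what is proved, stated in full; the proofs are below) =====
def Claim_equal_paragraphs_py : Prop := ∀ (body : String), Dom_paragraphs_py body → Spec_paragraphs_py body (paragraphs_py body)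

-- ===== LEMMAS AND PROOFS =====

-- A's per-line effect once (idx, stripped, skip) is known: in_code no longer needed
def pvStepA (st : List (String × Int) × List String × Int) (t : Int × String × Bool) :
    List (String × Int) × List String × Int :=
  if t.2.2 then
    if !st.2.1.isEmpty then (st.1 ++ [(PySem.Str.join " " st.2.1, st.2.2)], [], st.2.2)
    else st
  else
    (st.1, st.2.1 ++ [t.2.1], if st.2.1.isEmpty then t.1 else st.2.2)

def pvFinish (st : List (String × Int) × List String × Int) : List (String × Int) :=
  if !st.2.1.isEmpty then st.1 ++ [(PySem.Str.join " " st.2.1, st.2.2)] else st.1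

-- the flag table, computed structurally
def pvMkFlags : List (Int × String) → Bool → List (Int × String × Bool)
  | [], _ => []
  | p :: ps, ic =>
    let stripped := PySem.Str.strip p.2
    let ic' := if PySem.Str.startswith stripped "```" then !ic else ic
    (p.1, stripped, ic' || stripped == "" || pvSkipA stripped) :: pvMkFlags ps ic'

lemma pvSkipAB (s : String) : pvSkipA s = pvSkipB s := by
  unfold pvSkipA pvSkipB
  by_cases h3 : PySem.Str.startswith s "---" = true
  · have h1 : PySem.Str.startswith s "-" = true := by
      simp only [PySem.Str.startswith_eq, PySem.Chars.startswith_iff] at h3 ⊢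
      exact (show ("-").toList <+: ("---").toList by decide).trans h3
    simp only [h1, h3, Bool.or_true, Bool.true_or]
  · simp only [Bool.not_eq_true] at h3
    simp only [h3, Bool.or_false]

lemma pvFlags_fold (ps : List (Int × String)) (ic : Bool) (acc : List (Int × String × Bool)) :
    (ps.foldl
      (fun (st : List (Int × String × Bool) × Bool) p =>
        let stripped := PySem.Str.strip p.2
        let in_code := if PySem.Str.startswith stripped "```" then !st.2 else st.2
        (st.1 ++ [(p.1, stripped, in_code || stripped == "" || pvSkipB stripped)], in_code))
      (acc, ic)).1 = acc ++ pvMkFlags ps ic := by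
  induction ps generalizing ic acc with
  | nil => simp [pvMkFlags]
  | cons p ps ih =>
    simp only [List.foldl_cons]
    rw [ih]
    simp [pvMkFlags, pvSkipAB]

lemma pvFlags_eq (body : String) :
    pvFlags body = pvMkFlags (PySem.List.enumerate (PySem.Str.splitlines body) 1) false := by
  unfold pvFlags
  rw [pvFlags_fold]
  simp

def pvAStep (st : List (String × Int) × List String × Int × Bool) (p : Int × String) :
    List (String × Int) × List String × Int × Bool :=
  let stripped := PySem.Str.strip p.2
  let in_code := if PySem.Str.startswith stripped "```" then !st.2.2.2 else st.2.2.2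
  let skip := in_code || stripped == "" || pvSkipA stripped
  if skip then
    if !st.2.1.isEmpty then
      (st.1 ++ [(PySem.Str.join " " st.2.1, st.2.2.1)], [], st.2.2.1, in_code)
    else (st.1, st.2.1, st.2.2.1, in_code)
  else (st.1, st.2.1 ++ [stripped], (if st.2.1.isEmpty then p.1 else st.2.2.1), in_code)

lemma paragraphs_py_def (body : String) : paragraphs_py body =
    (let fin := (PySem.List.enumerate (PySem.Str.splitlines body) 1).foldl pvAStep ([], [], 1, false)
     if !fin.2.1.isEmpty then fin.1 ++ [(PySem.Str.join " " fin.2.1, fin.2.2.1)] else fin.1) := rfl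

lemma pvStep_commute (st : List (String × Int) × List String × Int × Bool) (p : Int × String) :
    pvAStep st p =
      (let stripped := PySem.Str.strip p.2
       let ic' := if PySem.Str.startswith stripped "```" then !st.2.2.2 else st.2.2.2
       let r := pvStepA (st.1, st.2.1, st.2.2.1) (p.1, stripped, ic' || stripped == "" || pvSkipA stripped)
       (r.1, r.2.1, r.2.2, ic')) := by
  obtain ⟨a, b, c, d⟩ := st
  simp only [pvAStep, pvStepA]
  split_ifs <;> rfl

lemma pvA_fold (ps : List (Int × String)) (st : List (String × Int) × List String × Int × Bool) :
    ps.foldl pvAStep st =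
      (let r := (pvMkFlags ps st.2.2.2).foldl pvStepA (st.1, st.2.1, st.2.2.1)
       (r.1, r.2.1, r.2.2,
        ps.foldl (fun b p => if PySem.Str.startswith (PySem.Str.strip p.2) "```" then !b else b) st.2.2.2)) := by
  induction ps generalizing st with
  | nil => simp [pvMkFlags]
  | cons p ps ih =>
    simp only [List.foldl_cons, pvMkFlags]
    rw [pvStep_commute, ih]

lemma pvMain (ts : List (Int × String × Bool)) :
    (∀ (paras : List (String × Int)) (sl : Int),
      pvFinish (ts.foldl pvStepA (paras, [], sl)) = paras ++ pvGroup ts) ∧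
    (∀ (paras : List (String × Int)) (cur : List String) (sl : Int), cur ≠ [] →
      pvFinish (ts.foldl pvStepA (paras, cur, sl)) =
        paras ++ (PySem.Str.join " " (cur ++ (ts.takeWhile (fun t => !t.2.2)).map (·.2.1)), sl)
          :: pvGroup (ts.dropWhile (fun t => !t.2.2))) := by
  induction ts with
  | nil =>
    refine ⟨fun paras sl => by simp [pvFinish, pvGroup], fun paras cur sl h => ?_⟩
    have hne : cur.isEmpty = false := by simpa using h
    simp [pvFinish, pvGroup, hne]
  | cons t ts ih =>
    obtain ⟨ih1, ih2⟩ := ih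
    refine ⟨fun paras sl => ?_, fun paras cur sl h => ?_⟩
    · by_cases hs : t.2.2 = true
      · simp only [List.foldl_cons, pvStepA, hs, if_true, List.isEmpty_nil, Bool.not_true,
          Bool.false_eq_true, if_false]
        rw [ih1]
        simp [pvGroup, hs]
      · simp only [List.foldl_cons, pvStepA, hs, Bool.false_eq_true, if_false, List.isEmpty_nil,
          if_true, List.nil_append]
        rw [ih2 paras [t.2.1] t.1 (by simp)]
        simp [pvGroup, hs]
    · have hne : cur.isEmpty = false := by simpa using h
      by_cases hs : t.2.2 = true
      · simp only [List.foldl_cons, pvStepA, hs, if_true, hne, Bool.not_false]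
        rw [ih1]
        simp [pvGroup, hs]
      · simp only [List.foldl_cons, pvStepA, hs, Bool.false_eq_true, if_false, hne]
        rw [ih2 paras (cur ++ [t.2.1]) sl (by simp)]
        simp [hs]

-- ===== VERDICT (by name: the statement is the Claim_ definition above) =====
theorem paragraphs_py_spec : Claim_equal_paragraphs_py := by
  intro body _
  unfold Spec_paragraphs_py paragraphs_py_alt
  rw [paragraphs_py_def, pvFlags_eq, pvA_fold]
  simpa [pvFinish] using (pvMain (pvMkFlags (PySem.List.enumerate (PySem.Str.splitlines body) 1) false)).1 [] 1
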